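-- pv_equiv track=rewrite | github.com/bryzZz/homework | third.py | findBetrothed
-- ===== SOURCE A (Python) =====
-- def devsSum(num):
--     s = 0
--     for i in range(1, num):
--         if num % i == 0:
--             s += i
--     return s
--
-- def findBetrothed(limit):
--     res = []
--     for i in range(1, limit):
--         if i not in res:
--             temp = devsSum(i)-1
--             if i == devsSum(temp)-1 and i != temp-1:
--                 res.append(i)
--                 res.append(temp)
--     return res
-- ===== SOURCE B (Python) =====
-- def _properDivSum(n):
--     # sum of proper divisors (< n) of n, 0 for n < 2; O(sqrt n) by pairing d with n//d
--     if n < 2: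
--         return 0
--     s = 1
--     i = 2
--     while i * i <= n:
--         if n % i == 0:
--             j = n // i
--             s += i + (j if j != i else 0)
--         i += 1
--     return s
--
-- def findBetrothed(limit):
--     res = []
--     seen = set()
--     for i in range(1, limit):
--         if i not in seen:
--             t = _properDivSum(i) - 1
--             if i == _properDivSum(t) - 1 and i != t - 1:
--                 res.append(i)
--                 res.append(t)
--                 seen.add(i)
--                 seen.add(t)
--     return res
-- ===== Notes on version B (the rewrite author's own statement) =====
-- stated objective: faster
-- what changed: devsSum's O(n) trial-division scan is replaced by an O(sqrt n) divisor-pairing sum (d and n//d counted together), and the 'already emitted' membership test uses a set alongside the result list.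
import Mathlib
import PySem

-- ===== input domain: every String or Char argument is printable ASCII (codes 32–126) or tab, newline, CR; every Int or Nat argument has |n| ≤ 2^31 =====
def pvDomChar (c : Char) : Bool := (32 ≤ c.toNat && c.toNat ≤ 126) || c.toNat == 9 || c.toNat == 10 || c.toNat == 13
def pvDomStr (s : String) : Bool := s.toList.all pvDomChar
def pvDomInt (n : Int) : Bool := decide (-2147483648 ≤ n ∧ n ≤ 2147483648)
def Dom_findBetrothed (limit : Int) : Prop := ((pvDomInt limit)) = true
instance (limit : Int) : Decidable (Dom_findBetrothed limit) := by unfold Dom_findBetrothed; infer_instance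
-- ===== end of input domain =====

-- B replaces A's O(n) trial scan in devsSum by the O(sqrt n) divisor-pairing sum and tracks
-- already-emitted members in a set; same results (objective: faster).

-- ===== PORT A =====
def devsSumA (num : Int) : Int :=
  (PySem.List.pyRange 1 num 1).foldl (fun s i => if PySem.Int.mod num i = 0 then s + i else s) 0

def findBetrothed (limit : Int) : List Int :=
  (PySem.List.pyRange 1 limit 1).foldl
    (fun res i =>
      if i ∈ res then res
      else
        let temp := devsSumA i - 1
        if i = devsSumA temp - 1 ∧ i ≠ temp - 1 then (res ++ [i]) ++ [temp] else res)
    []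

-- ===== PORT B =====
-- the 'while i * i <= n' loop of Source B's _properDivSum, with accumulator s
def pairLoop (n i s : Int) : Int :=
  if h : i * i ≤ n then
    pairLoop n (i + 1)
      (if PySem.Int.mod n i = 0 then
        s + (i + (if PySem.Int.floordiv n i ≠ i then PySem.Int.floordiv n i else 0))
      else s)
  else s
termination_by (n + 1 - i).toNat
decreasing_by
  have hi : i ≤ i * i := by nlinarith [sq_nonneg i, sq_nonneg (i - 1)]
  omega

def properDivSum (n : Int) : Int :=
  if n < 2 then 0 else pairLoop n 2 1

def findBetrothed_alt (limit : Int) : List Int :=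
  ((PySem.List.pyRange 1 limit 1).foldl
    (fun (st : List Int × PySem.Set Int) i =>
      if i ∈ st.2 then st
      else
        let t := properDivSum i - 1
        if i = properDivSum t - 1 ∧ i ≠ t - 1 then
          ((st.1 ++ [i]) ++ [t], PySem.Set.add (PySem.Set.add st.2 i) t)
        else st)
    ([], PySem.Set.empty)).1

-- ===== PRECONDITION & SPEC =====
def Spec_findBetrothed (limit : Int) (out : List Int) : Prop := out = findBetrothed_alt limit
instance (limit : Int) (out : List Int) : Decidable (Spec_findBetrothed limit out) := by unfold Spec_findBetrothed; infer_instance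

-- ===== CLAIM (what is proved, stated in full; the proofs are below) =====
def Claim_equal_findBetrothed : Prop := ∀ (limit : Int), Dom_findBetrothed limit → Spec_findBetrothed limit (findBetrothed limit)

-- ===== LEMMAS AND PROOFS =====

-- A's devsSum as a Finset sum over [1, b)
theorem devsSumA_fold_eq (n : Int) (b : ℕ) :
    (PySem.List.pyRange 1 (b : Int) 1).foldl
      (fun s i => if PySem.Int.mod n i = 0 then s + i else s) 0
      = ∑ d ∈ Finset.Ico 1 b, (if (d : Int) ∣ n then (d : Int) else 0) := by
  induction b with
  | zero =>
    rw [PySem.List.pyRange_one_eq_nil (by norm_num)]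
    simp
  | succ b ihb =>
    rcases Nat.eq_zero_or_pos b with hb | hb
    · subst hb
      rw [show ((0 + 1 : ℕ) : Int) = 1 by norm_num, PySem.List.pyRange_one_eq_nil (le_refl 1)]
      simp
    · rw [show ((b + 1 : ℕ) : Int) = (b : Int) + 1 by push_cast; ring,
        PySem.List.pyRange_one_succ_right (by exact_mod_cast hb), List.foldl_append, ihb,
        Finset.sum_Ico_succ_top hb]
      simp only [List.foldl_cons, List.foldl_nil, PySem.Int.mod_eq_zero_iff_dvd]
      split_ifs <;> simp

theorem devsSumA_eq_nat (m : ℕ) :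
    devsSumA (m : Int) = ((∑ d ∈ Nat.properDivisors m, d : ℕ) : Int) := by
  unfold devsSumA
  rw [devsSumA_fold_eq]
  have hp : Nat.properDivisors m = Finset.filter (fun d => d ∣ m) (Finset.Ico 1 m) := rfl
  rw [hp, Finset.sum_filter, Nat.cast_sum]
  refine Finset.sum_congr rfl ?_
  intro d _
  simp [Int.natCast_dvd_natCast]

-- B's pairing loop as a Finset sum over [i, sqrt m + 1)
theorem pairLoop_eq (m : ℕ) (hm : 2 ≤ m) :
    ∀ (k i : ℕ), Nat.sqrt m + 1 - i ≤ k → 1 ≤ i → ∀ (s : Int),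
      pairLoop (m : Int) (i : Int) s
        = s + ((∑ j ∈ Finset.Ico i (Nat.sqrt m + 1),
            (if j ∣ m then j + (if m / j ≠ j then m / j else 0) else 0) : ℕ) : Int) := by
  intro k
  induction k with
  | zero =>
    intro i hk _ s
    have hlt : m < i * i := Nat.sqrt_lt.mp (by omega)
    rw [pairLoop, dif_neg (by push_cast; exact_mod_cast not_le.mpr (by exact_mod_cast hlt))]
    rw [Finset.Ico_eq_empty (by omega)]
    simp
  | succ k ihk =>
    intro i hk hi s
    by_cases hg : i * i ≤ m
    · have hile : i ≤ Nat.sqrt m := Nat.le_sqrt.mpr hg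
      rw [pairLoop, dif_pos (by exact_mod_cast hg)]
      rw [show ((i : Int) + 1) = ((i + 1 : ℕ) : Int) by push_cast; ring]
      rw [ihk (i + 1) (by omega) (by omega)]
      rw [Finset.sum_eq_sum_Ico_succ_bot (show i < Nat.sqrt m + 1 by omega)]
      simp only [PySem.Int.mod_eq_zero_iff_dvd, Int.natCast_dvd_natCast,
        PySem.Int.floordiv_natCast, ne_eq, Nat.cast_inj]
      split_ifs <;> push_cast <;> ring
    · have hlt : m < i * i := not_le.mp hg
      have hsq : Nat.sqrt m < i := Nat.sqrt_lt.mpr hlt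
      rw [pairLoop, dif_neg (by exact_mod_cast not_le.mpr (by exact_mod_cast hlt))]
      rw [Finset.Ico_eq_empty (by omega)]
      simp

-- the divisor-pairing identity: proper divisors of m, summed via d ↦ m / d pairing below sqrt m
theorem pairing_sum (m : ℕ) (hm : 2 ≤ m) :
    ∑ d ∈ Nat.properDivisors m, d
      = 1 + ∑ j ∈ Finset.Ico 2 (Nat.sqrt m + 1),
          (if j ∣ m then j + (if m / j ≠ j then m / j else 0) else 0) := by
  have hm0 : 0 < m := by omega
  have hs1 : 1 ≤ Nat.sqrt m := Nat.le_sqrt.mpr (by omega)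
  have hsm : Nat.sqrt m < m := Nat.sqrt_lt_self (by omega)
  have hssle : Nat.sqrt m * Nat.sqrt m ≤ m := Nat.sqrt_le m
  have hmlt : m < (Nat.sqrt m + 1) * (Nat.sqrt m + 1) := Nat.lt_succ_sqrt m
  -- split the right-hand side
  rw [← Finset.sum_filter, Finset.sum_add_distrib, ← Finset.sum_filter]
  -- split the left-hand side at sqrt m
  rw [← Finset.sum_filter_add_sum_filter_not (Nat.properDivisors m) (fun d => d ≤ Nat.sqrt m)]
  have hsmall : Finset.filter (fun d => d ≤ Nat.sqrt m) (Nat.properDivisors m)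
      = Finset.filter (fun d => d ∣ m) (Finset.Ico 1 (Nat.sqrt m + 1)) := by
    ext d
    simp only [Finset.mem_filter, Nat.mem_properDivisors, Finset.mem_Ico]
    constructor
    · rintro ⟨⟨hd, _⟩, hds⟩
      exact ⟨⟨Nat.pos_of_dvd_of_pos hd hm0, by omega⟩, hd⟩
    · rintro ⟨⟨_, h2⟩, hd⟩
      exact ⟨⟨hd, by omega⟩, by omega⟩
  have hA : ∑ d ∈ Finset.filter (fun d => d ≤ Nat.sqrt m) (Nat.properDivisors m), d
      = 1 + ∑ j ∈ Finset.filter (fun j => j ∣ m) (Finset.Ico 2 (Nat.sqrt m + 1)), j := by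
    rw [hsmall, Finset.sum_filter,
      Finset.sum_eq_sum_Ico_succ_bot (show 1 < Nat.sqrt m + 1 by omega), if_pos (one_dvd m),
      ← Finset.sum_filter]
  have hB : ∑ d ∈ Finset.filter (fun d => ¬ d ≤ Nat.sqrt m) (Nat.properDivisors m), d
      = ∑ j ∈ Finset.filter (fun j => m / j ≠ j)
          (Finset.filter (fun j => j ∣ m) (Finset.Ico 2 (Nat.sqrt m + 1))), m / j := by
    refine Finset.sum_nbij' (fun d => m / d) (fun j => m / j) ?_ ?_ ?_ ?_ ?_
    · intro d hd
      simp only [Finset.mem_filter, Nat.mem_properDivisors, not_le] at hd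
      obtain ⟨⟨hdvd, hdm⟩, hds⟩ := hd
      have hd0 : 0 < d := Nat.pos_of_dvd_of_pos hdvd hm0
      obtain ⟨k, hk⟩ := hdvd
      have hqd : m / d = k := by rw [hk]; exact Nat.mul_div_cancel_left k hd0
      have hk0 : k ≠ 0 := by rintro rfl; omega
      have hk1 : k ≠ 1 := by rintro rfl; omega
      have hkle : k ≤ Nat.sqrt m := by
        by_contra hkg
        have : (Nat.sqrt m + 1) * (Nat.sqrt m + 1) ≤ d * k :=
          Nat.mul_le_mul (by omega) (by omega)
        omega
      have hq2 : m / (m / d) = d := Nat.div_div_self ⟨k, hk⟩ (by omega)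
      simp only [Finset.mem_filter, Finset.mem_Ico]
      refine ⟨⟨⟨by omega, by omega⟩, ?_⟩, ?_⟩
      · exact ⟨d, by rw [hqd, hk]; ring⟩
      · rw [hq2, hqd]; omega
    · intro j hj
      simp only [Finset.mem_filter, Finset.mem_Ico] at hj
      obtain ⟨⟨⟨hj2, hjs⟩, hjdvd⟩, hjne⟩ := hj
      obtain ⟨k, hk⟩ := hjdvd
      have hj0 : 0 < j := by omega
      have hqj : m / j = k := by rw [hk]; exact Nat.mul_div_cancel_left k hj0
      have hk0 : 0 < k := Nat.pos_of_ne_zero (by rintro rfl; omega)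
      have hks : Nat.sqrt m < k := by
        by_contra hkle
        push Not at hkle
        have h1 : j * k ≤ j * Nat.sqrt m := Nat.mul_le_mul_left j hkle
        have h2 : j * Nat.sqrt m ≤ Nat.sqrt m * Nat.sqrt m :=
          Nat.mul_le_mul_right (Nat.sqrt m) (by omega)
        have heq : j * k = Nat.sqrt m * Nat.sqrt m := le_antisymm (le_trans h1 h2) (by omega)
        have hjs' : j * Nat.sqrt m = Nat.sqrt m * Nat.sqrt m := le_antisymm h2 (by omega)
        have hj_eq : j = Nat.sqrt m := Nat.eq_of_mul_eq_mul_right (by omega) hjs'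
        have hk_eq : k = j := by
          have : j * k = j * j := by rw [heq, hj_eq]
          exact Nat.eq_of_mul_eq_mul_left hj0 this
        omega
      simp only [Finset.mem_filter, Nat.mem_properDivisors, not_le]
      refine ⟨⟨⟨j, by rw [hqj, hk]; ring⟩, ?_⟩, by omega⟩
      rw [hqj]
      calc k ≤ 1 * k := by omega
        _ < j * k := (Nat.mul_lt_mul_right hk0).mpr (by omega)
        _ = m := hk.symm
    · intro d hd
      simp only [Finset.mem_filter, Nat.mem_properDivisors, not_le] at hd
      exact Nat.div_div_self hd.1.1 (by omega)
    · intro j hj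
      simp only [Finset.mem_filter, Finset.mem_Ico] at hj
      exact Nat.div_div_self hj.1.2 (by omega)
    · intro d hd
      simp only [Finset.mem_filter, Nat.mem_properDivisors, not_le] at hd
      exact (Nat.div_div_self hd.1.1 (by omega)).symm
  rw [hA, hB]
  ring

theorem properDivSum_eq (n : Int) : properDivSum n = devsSumA n := by
  by_cases hn : n < 2
  · unfold properDivSum devsSumA
    rw [if_pos hn, PySem.List.pyRange_one_eq_nil (by omega)]
    simp
  · have hm2 : 2 ≤ n.toNat := by omega
    have hcast : ((n.toNat : ℕ) : Int) = n := Int.toNat_of_nonneg (by omega)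
    rw [← hcast]
    unfold properDivSum
    rw [if_neg (by omega)]
    rw [show ((2 : Int)) = ((2 : ℕ) : Int) by norm_num,
      pairLoop_eq n.toNat hm2 (Nat.sqrt n.toNat + 1) 2 (by omega) (by omega) 1,
      devsSumA_eq_nat, pairing_sum n.toNat hm2]
    push_cast
    ring

theorem fold_eq (l : List Int) :
    ∀ (res : List Int) (seen : PySem.Set Int), (∀ x : Int, x ∈ seen ↔ x ∈ res) →
      (l.foldl
        (fun (st : List Int × PySem.Set Int) i =>
          if i ∈ st.2 then st
          else
            let t := properDivSum i - 1
            if i = properDivSum t - 1 ∧ i ≠ t - 1 then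
              ((st.1 ++ [i]) ++ [t], PySem.Set.add (PySem.Set.add st.2 i) t)
            else st)
        (res, seen)).1
      = l.foldl
          (fun res i =>
            if i ∈ res then res
            else
              let temp := devsSumA i - 1
              if i = devsSumA temp - 1 ∧ i ≠ temp - 1 then (res ++ [i]) ++ [temp] else res)
          res := by
  induction l with
  | nil => simp
  | cons a l ih =>
    intro res seen h
    simp only [List.foldl_cons, properDivSum_eq] at ih ⊢
    by_cases hmem : a ∈ res
    · rw [if_pos ((h a).mpr hmem), if_pos hmem]
      exact ih res seen h
    · rw [if_neg (fun hc => hmem ((h a).mp hc)), if_neg hmem]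
      by_cases hc : a = devsSumA (devsSumA a - 1) - 1 ∧ a ≠ (devsSumA a - 1) - 1
      · rw [if_pos hc, if_pos hc]
        refine ih _ _ ?_
        intro x
        simp only [PySem.Set.mem_add, List.mem_append, List.mem_singleton, h x]
      · rw [if_neg hc, if_neg hc]
        exact ih res seen h

-- ===== VERDICT (by name: the statement is the Claim_ definition above) =====
theorem findBetrothed_spec : Claim_equal_findBetrothed := by
  intro limit _
  unfold Spec_findBetrothed findBetrothed findBetrothed_alt
  exact (fold_eq _ [] PySem.Set.empty (by simp [PySem.Set.empty])).symm
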